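-- pv_equiv track=rewrite | github.com/fcjdgmrvwm/multipost | tiny_server.py | path_fix
-- ===== SOURCE A (Python) =====
-- def path_fix(path):
--     flag = 0
--     bpath = ""
--     for i in path:
--         if i == '/':
--             if flag == 0:
--                 bpath += "/"
--                 flag = 1
--         else:
--             bpath += i
--             flag = 0
--     return bpath
-- ===== SOURCE B (Python) =====
-- import re
--
-- def path_fix(path):
--     return re.sub(r'/+', '/', path)
-- ===== Notes on version B (the rewrite author's own statement) =====
-- stated objective: idiomatic
-- what changed: Replaced the manual per-character scan with flag state by a single regex substitution that collapses each maximal run of slashes to one slash.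
import Mathlib
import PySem

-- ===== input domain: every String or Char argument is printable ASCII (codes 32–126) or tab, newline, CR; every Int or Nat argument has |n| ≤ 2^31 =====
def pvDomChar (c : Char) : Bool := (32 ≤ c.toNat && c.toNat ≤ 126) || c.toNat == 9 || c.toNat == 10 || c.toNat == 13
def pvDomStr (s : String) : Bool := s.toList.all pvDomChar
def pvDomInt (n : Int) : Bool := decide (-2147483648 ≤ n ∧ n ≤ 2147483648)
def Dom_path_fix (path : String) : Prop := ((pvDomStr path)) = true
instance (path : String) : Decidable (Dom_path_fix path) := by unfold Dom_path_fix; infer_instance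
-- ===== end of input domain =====

-- B replaces A's flag-carrying character scan with one regex substitution re.sub(r'/+', '/', path); idiomatic, same cost.


-- ===== PORT A =====
-- A's loop: for each char, if '/', append only when flag = 0 and set flag := 1; else append and reset flag.
-- The Python string accumulator is represented as a List Char, turned into a String at the end.
def path_fix_step (st : Int × List Char) (c : Char) : Int × List Char :=
  if c = '/' then
    (if st.1 = 0 then (1, st.2 ++ ['/']) else st)
  else
    (0, st.2 ++ [c])

def path_fix (path : String) : String :=
  String.mk (path.toList.foldl path_fix_step (0, [])).2

-- ===== PORT B =====
-- re.sub(r'/+', '/', path): each maximal run of '/' is replaced by a single '/'.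
-- Exact for this fixed pattern: on seeing '/', emit one '/' and skip the rest of the run.
def collapseSlashes : List Char → List Char
  | [] => []
  | c :: rest =>
    if c = '/' then '/' :: collapseSlashes (rest.dropWhile (· = '/'))
    else c :: collapseSlashes rest
termination_by l => l.length
decreasing_by
  · exact Nat.lt_succ_of_le (List.length_dropWhile_le _ _)
  · simp

def path_fix_alt (path : String) : String :=
  String.mk (collapseSlashes path.toList)

-- ===== PRECONDITION & SPEC =====
def Spec_path_fix (path : String) (out : String) : Prop := out = path_fix_alt path
instance (path : String) (out : String) : Decidable (Spec_path_fix path out) := by unfold Spec_path_fix; infer_instance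

-- ===== CLAIM (what is proved, stated in full; the proofs are below) =====
def Claim_equal_path_fix : Prop := ∀ (path : String), Dom_path_fix path → Spec_path_fix path (path_fix path)

-- ===== LEMMAS AND PROOFS =====
-- Invariant: flag = 0 means "last emitted char was not '/'", flag = 1 means "inside a slash run".
theorem path_fix_loop_inv (l : List Char) :
    (∀ acc : List Char, (l.foldl path_fix_step (0, acc)).2 = acc ++ collapseSlashes l) ∧
    (∀ acc : List Char, (l.foldl path_fix_step (1, acc)).2
        = acc ++ collapseSlashes (l.dropWhile (· = '/'))) := by
  induction l with
  | nil => simp [collapseSlashes]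
  | cons c rest ih =>
    by_cases hc : c = '/'
    · subst hc
      constructor
      · intro acc
        simp only [List.foldl_cons, path_fix_step]
        norm_num
        rw [ih.2 (acc ++ ['/']), collapseSlashes]
        simp
      · intro acc
        simp only [List.foldl_cons, path_fix_step]
        norm_num
        rw [ih.2 acc]
    · constructor
      · intro acc
        simp only [List.foldl_cons, path_fix_step, if_neg hc]
        rw [ih.1 (acc ++ [c]), collapseSlashes, if_neg hc]
        simp
      · intro acc
        simp only [List.foldl_cons, path_fix_step, if_neg hc]
        rw [ih.1 (acc ++ [c]), List.dropWhile_cons, if_neg (by simpa using hc), collapseSlashes]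
        simp [hc]

-- ===== VERDICT (by name: the statement is the Claim_ definition above) =====
theorem path_fix_spec : Claim_equal_path_fix := by
  intro path _
  unfold Spec_path_fix path_fix path_fix_alt
  rw [(path_fix_loop_inv path.toList).1 []]
  simp
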